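-- pv_equiv track=rewrite | github.com/Nic30/pyMathBitPrecise | pyMathBitPrecise/bit_utils.py | iter_bits_sequences
-- ===== SOURCE A (Python) =====
-- from typing import List, Tuple, Generator, Union, Optional, Literal, Sequence
--
-- def iter_bits_sequences(val: int, length: int) -> Generator[Tuple[Literal[0, 1], int], None, None]:
--     """
--     Iter tuples (bitVal, number of same bits), lsb first
--     """
--     assert length > 0, length
--     assert val >= 0
--     # start of new bit seqence
--     w = 1
--     valBit = val & 1
--     val >>= 1
--     foundBit = valBit
--     for _ in range(length - 1):
--         # extract single bit from val
--         valBit = val & 1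
--         val >>= 1
--         # check if it fits into current bit sequence
--         if valBit == foundBit:
--             w += 1
--         else:
--             # end of sequence of same bits
--             yield (foundBit, w)
--             foundBit = valBit
--             w = 1
--
--     if w != 0:
--         yield (foundBit, w)
-- ===== SOURCE B (Python) =====
-- def iter_bits_sequences(val, length):
--     """
--     Iter tuples (bitVal, number of same bits), lsb first
--     """
--     assert length > 0, length
--     assert val >= 0
--     pos = 0
--     while pos < length:
--         b = val & 1
--         if b:
--             run = (val ^ (val + 1)).bit_length() - 1   # trailing ones of val
--         elif val == 0:
--             run = length - pos                         # all remaining bits are 0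
--         else:
--             run = (val ^ (val - 1)).bit_length() - 1   # trailing zeros of val
--         run = min(run, length - pos)
--         yield (b, run)
--         val >>= run
--         pos += run
-- ===== Notes on version B (the rewrite author's own statement) =====
-- stated objective: faster
-- what changed: B jumps run by run using closed-form bit arithmetic -- each run length is read off at once from bit_length of val^(val+1) (trailing ones) or val^(val-1) (trailing zeros), then val is shifted by the whole run -- instead of A's bit-by-bit scan carrying a (foundBit, width) state machine.
import Mathlib
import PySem

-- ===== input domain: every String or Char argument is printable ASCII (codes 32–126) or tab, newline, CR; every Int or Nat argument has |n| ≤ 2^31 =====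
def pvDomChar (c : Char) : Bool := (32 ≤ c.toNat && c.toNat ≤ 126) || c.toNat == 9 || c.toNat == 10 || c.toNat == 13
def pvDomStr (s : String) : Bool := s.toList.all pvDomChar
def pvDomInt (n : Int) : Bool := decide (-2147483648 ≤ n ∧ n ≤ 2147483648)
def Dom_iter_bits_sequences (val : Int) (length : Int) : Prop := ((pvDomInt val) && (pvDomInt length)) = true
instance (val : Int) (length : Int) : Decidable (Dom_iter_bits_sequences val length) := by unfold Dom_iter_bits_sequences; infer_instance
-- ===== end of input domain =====

-- B jumps run by run: each run length is read off at once from bit_length of val^(val+1)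
-- (trailing ones) resp. val^(val-1) (trailing zeros) and val is shifted by the whole run,
-- instead of A's bit-by-bit scan carrying a (foundBit, w) state machine: one loop iteration per run
-- instead of one per bit (measured faster in a timing run on the generated inputs).
-- Both Pythons are generators, so the proved equality is about the list(...) of yielded pairs.

-- ===== PORT A =====
-- One fold step of A's 'for _ in range(length - 1)' loop; state = (acc, w, foundBit, val).
-- Python's 'val & 1' is exactly floor-mod by 2 and 'val >>= 1' exactly floor-div by 2 (all ints).
def aStep (s : List (Int × Int) × Int × Int × Int) (_ : Int) : List (Int × Int) × Int × Int × Int :=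
  let vb := PySem.Int.mod s.2.2.2 2
  let v' := PySem.Int.floordiv s.2.2.2 2
  if vb = s.2.2.1 then (s.1, s.2.1 + 1, s.2.2.1, v')
  else (s.1 ++ [(s.2.2.1, s.2.1)], 1, vb, v')

def iter_bits_sequences (val : Int) (length : Int) : List (Int × Int) :=
  if 0 < length ∧ 0 ≤ val then  -- the two asserts; AssertionError outside Pre_
    let valBit := PySem.Int.mod val 2
    let val1 := PySem.Int.floordiv val 2
    let s := (PySem.List.pyRange 0 (length - 1) 1).foldl aStep ([], 1, valBit, val1)
    if s.2.1 ≠ 0 then s.1 ++ [(s.2.2.1, s.2.1)] else s.1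
  else []

-- ===== PORT B =====
-- B's 'while pos < length' loop. fuel is only termination plumbing: each iteration consumes at
-- least one bit (run ≥ 1 whenever 0 ≤ val), so fuel = length.toNat is never exhausted in-domain.
-- 'val >>= run' is '>>> run.toNat' (run ≥ 0 whenever 0 ≤ val; Python raises on a negative shift).
def altLoop : Nat → Int → Int → Int → List (Int × Int)
  | 0, _, _, _ => []
  | fuel+1, v, pos, length =>
    if pos < length then
      let b := PySem.Int.band v 1
      let run0 : Int :=
        if b ≠ 0 then (PySem.Int.bitLength (PySem.Int.bxor v (v + 1)) : Int) - 1
        else if v = 0 then length - pos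
        else (PySem.Int.bitLength (PySem.Int.bxor v (v - 1)) : Int) - 1
      let run := min run0 (length - pos)
      (b, run) :: altLoop fuel (v >>> run.toNat) (pos + run) length
    else []

def iter_bits_sequences_alt (val : Int) (length : Int) : List (Int × Int) :=
  if 0 < length ∧ 0 ≤ val then  -- the same two asserts
    altLoop length.toNat val 0 length
  else []

-- ===== PRECONDITION & SPEC =====
-- Exactly the two asserts of A (and of B): outside them both raise AssertionError.
def Pre_iter_bits_sequences (val : Int) (length : Int) : Prop := 0 < length ∧ 0 ≤ val
instance (val : Int) (length : Int) : Decidable (Pre_iter_bits_sequences val length) := by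
  unfold Pre_iter_bits_sequences; infer_instance
def pvWitness_iter_bits_sequences : Int × Int := (5, 4)

def Spec_iter_bits_sequences (val : Int) (length : Int) (out : List (Int × Int)) : Prop := out = iter_bits_sequences_alt val length
instance (val : Int) (length : Int) (out : List (Int × Int)) : Decidable (Spec_iter_bits_sequences val length out) := by unfold Spec_iter_bits_sequences; infer_instance

-- ===== CLAIM (what is proved, stated in full; the proofs are below) =====
def Claim_equal_iter_bits_sequences : Prop := ∀ (val : Int) (length : Int), Dom_iter_bits_sequences val length → Pre_iter_bits_sequences val length → Spec_iter_bits_sequences val length (iter_bits_sequences val length)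

-- ===== LEMMAS AND PROOFS =====

-- cast bridges (cite PySem lemmas; the numeral 2 must become a Nat cast first)
theorem modc (n : Nat) : PySem.Int.mod (n : Int) 2 = ((n % 2 : Nat) : Int) := by
  exact_mod_cast PySem.Int.mod_natCast n 2
theorem divc (n : Nat) : PySem.Int.floordiv (n : Int) 2 = ((n / 2 : Nat) : Int) := by
  exact_mod_cast PySem.Int.floordiv_natCast n 2
theorem bandc (n : Nat) : PySem.Int.band (n : Int) 1 = ((n % 2 : Nat) : Int) := by
  rw [PySem.Int.band_one]; exact modc n

-- trailing-ones / trailing-zeros counters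
def tones : Nat → Nat
  | n => if n % 2 = 1 then tones (n / 2) + 1 else 0
decreasing_by omega

def tzeros : Nat → Nat
  | n => if n % 2 = 0 ∧ n ≠ 0 then tzeros (n / 2) + 1 else 0
decreasing_by omega

-- fueled trailing count of bit b
def tc (b : Nat) : Nat → Nat → Nat
  | 0, _ => 0
  | k+1, n => if n % 2 = b then tc b k (n / 2) + 1 else 0

-- run length B reads off, for remaining value n and r ≥ 1 remaining bits
def runOf (n r : Nat) : Nat :=
  min (if n % 2 = 1 then tones n else if n = 0 then r else tzeros n) r

theorem tones_pos {n : Nat} (h : n % 2 = 1) : 1 ≤ tones n := by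
  rw [tones]; simp [h]

theorem tzeros_pos {n : Nat} (h : n % 2 = 0) (h0 : n ≠ 0) : 1 ≤ tzeros n := by
  rw [tzeros]; simp [h, h0]

theorem runOf_pos {n r : Nat} (hr : 1 ≤ r) : 1 ≤ runOf n r := by
  unfold runOf
  split_ifs with h1 h2
  · exact le_min (tones_pos h1) hr
  · omega
  · exact le_min (tzeros_pos (by omega) h2) hr

theorem tones_odd {n : Nat} (h : n % 2 = 1) : tones n = tones (n / 2) + 1 := by
  rw [tones]; simp [h]

theorem tones_even {n : Nat} (h : n % 2 ≠ 1) : tones n = 0 := by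
  rw [tones]; simp [h]

theorem tzeros_even {n : Nat} (h : n % 2 = 0) (h0 : n ≠ 0) : tzeros n = tzeros (n / 2) + 1 := by
  rw [tzeros]; simp [h, h0]

theorem tzeros_odd {n : Nat} (h : n % 2 = 1) : tzeros n = 0 := by
  rw [tzeros]; simp [h]

-- the reference run decomposition both programs compute
def loopR : Nat → Nat → List (Int × Int)
  | 0, _ => []
  | r+1, n =>
    ((((n % 2 : Nat)) : Int), ((runOf n (r+1) : Nat) : Int)) ::
      loopR ((r+1) - runOf n (r+1)) (n / 2 ^ runOf n (r+1))
termination_by r _ => r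
decreasing_by have := runOf_pos (n := n) (r := r+1) (by omega); omega

theorem loopR_zero (n : Nat) : loopR 0 n = [] := by rw [loopR]

theorem loopR_succ (r n : Nat) :
    loopR (r+1) n = ((((n % 2 : Nat)) : Int), ((runOf n (r+1) : Nat) : Int)) ::
      loopR ((r+1) - runOf n (r+1)) (n / 2 ^ runOf n (r+1)) := by
  rw [loopR]

-- A's tail: remaining output given k more bits, unread bits v, current run (fb, w)
def loopA : Nat → Int → Int → Int → List (Int × Int)
  | 0, _, fb, w => [(fb, w)]
  | k+1, v, fb, w =>
    let vb := PySem.Int.mod v 2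
    let v' := PySem.Int.floordiv v 2
    if vb = fb then loopA k v' fb (w+1)
    else (fb, w) :: loopA k v' vb 1

-- xor recursions, instances of Nat.xor_bit
theorem xorf (a b : Nat) : (2*a) ^^^ (2*b+1) = 2*(a ^^^ b) + 1 := by
  have := Nat.xor_bit false a true b
  simpa [Nat.bit, two_mul, Nat.add_comm] using this

theorem xort (a b : Nat) : (2*a+1) ^^^ (2*b) = 2*(a ^^^ b) + 1 := by
  have := Nat.xor_bit true a false b
  simpa [Nat.bit, two_mul, Nat.add_comm] using this

-- n ^ (n+1) = all-ones mask over the trailing-ones block plus its closing 0-bit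
theorem xor_succ (n : Nat) : n ^^^ (n+1) = 2 ^ (tones n + 1) - 1 := by
  induction n using Nat.strong_induction_on with
  | _ n ih =>
    rcases Nat.even_or_odd n with he | ho
    · obtain ⟨a, ha⟩ := he
      have h2 : n % 2 = 0 := by omega
      have hx : n ^^^ (n+1) = 2*(a ^^^ a) + 1 := by
        rw [show n = 2*a by omega]; exact xorf a a
      rw [hx, tones_even (by omega)]
      norm_num
    · obtain ⟨a, ha⟩ := ho
      have h2 : n % 2 = 1 := by omega
      have hx : n ^^^ (n+1) = 2*(a ^^^ (a+1)) + 1 := by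
        rw [show n = 2*a+1 by omega, show 2*a+1+1 = 2*(a+1) by ring]; exact xort a (a+1)
      have hia := ih a (by omega)
      have hp : 1 ≤ 2 ^ (tones a + 1) := Nat.one_le_two_pow
      have hda : n / 2 = a := by omega
      have h2p : 2 ^ (tones a + 1 + 1) = 2 * 2 ^ (tones a + 1) := by ring
      have ht : tones n = tones a + 1 := by rw [tones_odd h2, hda]
      rw [hx, hia, ht]
      omega

-- n ^ (n-1) = all-ones mask over the trailing-zeros block plus its closing 1-bit, n ≥ 1
theorem xor_pred (n : Nat) (hn : 1 ≤ n) : n ^^^ (n-1) = 2 ^ (tzeros n + 1) - 1 := by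
  induction n using Nat.strong_induction_on with
  | _ n ih =>
    rcases Nat.even_or_odd n with he | ho
    · obtain ⟨a, ha⟩ := he
      have ha1 : 1 ≤ a := by omega
      have h2 : n % 2 = 0 := by omega
      have hx : n ^^^ (n-1) = 2*(a ^^^ (a-1)) + 1 := by
        rw [show n = 2*a by omega, show 2*a-1 = 2*(a-1)+1 by omega]; exact xorf a (a-1)
      have hia := ih a (by omega) ha1
      have hp : 1 ≤ 2 ^ (tzeros a + 1) := Nat.one_le_two_pow
      have hda : n / 2 = a := by omega
      have h2p : 2 ^ (tzeros a + 1 + 1) = 2 * 2 ^ (tzeros a + 1) := by ring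
      have ht : tzeros n = tzeros a + 1 := by rw [tzeros_even h2 (by omega), hda]
      rw [hx, hia, ht]
      omega
    · obtain ⟨a, ha⟩ := ho
      have h2 : n % 2 = 1 := by omega
      have hx : n ^^^ (n-1) = 2*(a ^^^ a) + 1 := by
        rw [show n = 2*a+1 by omega, show 2*a+1-1 = 2*a by omega]; exact xort a a
      rw [hx, tzeros_odd h2]
      norm_num

-- bit_length of 2^k - 1 is k
theorem blen_pow (k : Nat) : PySem.Int.bitLength ((2 ^ k - 1 : Nat) : Int) = k := by
  induction k with
  | zero => simp
  | succ k ih =>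
    have hp : 1 ≤ 2 ^ k := Nat.one_le_two_pow
    have h2p : 2 ^ (k+1) = 2 * 2 ^ k := by ring
    have h0 : 0 < 2 ^ (k+1) - 1 := by omega
    have hd : (2 ^ (k+1) - 1) / 2 = 2 ^ k - 1 := by omega
    rw [PySem.Int.bitLength_natCast h0, hd, ih]

-- fueled trailing counts vs tones / tzeros
theorem tc_one (k : Nat) : ∀ m : Nat, tc 1 k m = min (tones m) k := by
  induction k with
  | zero => intro m; simp [tc]
  | succ k ih =>
    intro m
    by_cases h : m % 2 = 1
    · rw [tc, if_pos h, ih (m / 2), tones_odd h]; omega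
    · rw [tc, if_neg h, tones_even h]; simp

theorem tc_zero (k : Nat) : ∀ m : Nat, 1 ≤ m → tc 0 k m = min (tzeros m) k := by
  induction k with
  | zero => intro m _; simp [tc]
  | succ k ih =>
    intro m hm
    by_cases h : m % 2 = 0
    · rw [tc, if_pos h, ih (m / 2) (by omega), tzeros_even h (by omega)]; omega
    · rw [tc, if_neg h, tzeros_odd (by omega)]; simp

theorem tc_zero_zero (k : Nat) : tc 0 k 0 = k := by
  induction k with
  | zero => rfl
  | succ k ih => rw [tc]; simp [ih]

-- B's head run at n with k+1 bits left = 1 + trailing count of the next bit in n/2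
theorem runOf_eq_tc (k n : Nat) : runOf n (k+1) = tc (n % 2) k (n / 2) + 1 := by
  unfold runOf
  by_cases h1 : n % 2 = 1
  · rw [if_pos h1, h1, tc_one k (n / 2), tones_odd h1]; omega
  · rw [if_neg h1]
    by_cases h0 : n = 0
    · subst h0; simp [tc_zero_zero]
    · rw [if_neg h0]
      have h2 : n % 2 = 0 := by omega
      rw [h2, tc_zero k (n / 2) (by omega), tzeros_even h2 h0]; omega

-- A's scan over k more bits, unread value n, current run (b, w)
theorem scanA (k : Nat) : ∀ (n b : Nat) (w : Int), 1 ≤ w →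
    loopA k ((n : Int)) ((b : Int)) w
      = (((b : Nat) : Int), w + ((tc b k n : Nat) : Int)) ::
          loopR (k - tc b k n) (n / 2 ^ tc b k n) := by
  induction k with
  | zero =>
    intro n b w _
    simp [loopA, tc, loopR_zero]
  | succ k ih =>
    intro n b w hw
    rw [loopA]
    simp only [modc n, divc n]
    by_cases h : n % 2 = b
    · rw [if_pos (by exact_mod_cast h)]
      rw [ih (n / 2) b (w + 1) (by omega)]
      rw [tc, if_pos h]
      have hs : n / 2 / 2 ^ tc b k (n / 2) = n / 2 ^ (tc b k (n / 2) + 1) := by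
        rw [Nat.div_div_eq_div_mul, pow_succ']
      rw [hs]
      congr 2
      · push_cast; ring
      · omega
    · have hne : ((n % 2 : Nat) : Int) ≠ ((b : Nat) : Int) := by
        exact_mod_cast h
      rw [if_neg hne, tc, if_neg h]
      simp only [Nat.sub_zero, pow_zero, Nat.div_one, Nat.cast_zero, add_zero]
      congr 1
      -- loopA k (n/2) (n%2) 1 = loopR (k+1) n
      rw [ih (n / 2) (n % 2) 1 (by omega)]
      rw [loopR_succ k n, runOf_eq_tc k n]
      have hs : n / 2 / 2 ^ tc (n % 2) k (n / 2) = n / 2 ^ (tc (n % 2) k (n / 2) + 1) := by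
        rw [Nat.div_div_eq_div_mul, pow_succ']
      rw [hs]
      congr 2
      · push_cast; ring
      · omega

-- B's loop equals the run decomposition
theorem altLoop_eq (fuel : Nat) : ∀ (n : Nat) (pos length : Int),
    pos ≤ length → (length - pos).toNat ≤ fuel →
    altLoop fuel ((n : Int)) pos length = loopR (length - pos).toNat n := by
  induction fuel with
  | zero =>
    intro n pos length _ hf
    have h0 : (length - pos).toNat = 0 := by omega
    rw [h0, loopR_zero, altLoop]
  | succ fuel ih =>
    intro n pos length hpl hf
    by_cases hlt : pos < length
    · set r : Nat := (length - pos).toNat with hr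
      have hr1 : 1 ≤ r := by omega
      have hrc : ((r : Nat) : Int) = length - pos := by omega
      -- the run the port computes, as a Nat
      have hrun : (min (if PySem.Int.band (n : Int) 1 ≠ 0 then
            (PySem.Int.bitLength (PySem.Int.bxor (n : Int) ((n : Int) + 1)) : Int) - 1
          else if (n : Int) = 0 then length - pos
          else (PySem.Int.bitLength (PySem.Int.bxor (n : Int) ((n : Int) - 1)) : Int) - 1)
          (length - pos)) = ((runOf n r : Nat) : Int) := by
        unfold runOf
        by_cases h1 : n % 2 = 1
        · rw [if_pos (by rw [bandc n, h1]; exact one_ne_zero)]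
          have hx : PySem.Int.bxor (n : Int) ((n : Int) + 1) = ((n ^^^ (n+1) : Nat) : Int) := by
            exact_mod_cast PySem.Int.bxor_natCast n (n+1)
          rw [hx, xor_succ n, blen_pow (tones n + 1), if_pos h1, ← hrc]
          push_cast
          omega
        · rw [if_neg (by rw [bandc n]; simp [Nat.mod_two_ne_one.mp h1]), if_neg h1]
          by_cases h0 : n = 0
          · subst h0
            simp [← hrc]
          · rw [if_neg (by exact_mod_cast h0), if_neg h0]
            have hn1 : 1 ≤ n := by omega
            have hx : PySem.Int.bxor (n : Int) ((n : Int) - 1) = ((n ^^^ (n-1) : Nat) : Int) := by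
              have : ((n : Int) - 1) = ((n - 1 : Nat) : Int) := by omega
              rw [this]
              exact PySem.Int.bxor_natCast n (n-1)
            rw [hx, xor_pred n hn1, blen_pow (tzeros n + 1), ← hrc]
            push_cast
            omega
      rw [altLoop, if_pos hlt]
      simp only [hrun]
      have htn : (((runOf n r : Nat) : Int)).toNat = runOf n r := Int.toNat_natCast _
      have hsh : ((n : Int) >>> (runOf n r)) = ((n / 2 ^ runOf n r : Nat) : Int) := by
        rw [show ((n : Int) >>> (runOf n r)) = ((n >>> runOf n r : Nat) : Int) from rfl,
          Nat.shiftRight_eq_div_pow]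
      have hle := runOf_pos (n := n) (r := r) hr1
      have hle2 : runOf n r ≤ r := min_le_right _ _
      rw [htn, hsh]
      rw [ih (n / 2 ^ runOf n r) (pos + ((runOf n r : Nat) : Int)) length (by omega) (by omega)]
      have hrem : (length - (pos + ((runOf n r : Nat) : Int))).toNat = r - runOf n r := by omega
      rw [hrem]
      have hru : r = (r - 1) + 1 := by omega
      rw [hru, loopR_succ (r - 1) _, ← hru, bandc n]
    · have h0 : (length - pos).toNat = 0 := by omega
      rw [h0, loopR, altLoop, if_neg hlt]

-- A's fold (with the final 'if w != 0' emit) produces acc ++ loopA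
theorem foldA_eq (l : List Int) : ∀ (acc : List (Int × Int)) (w fb v : Int), 1 ≤ w →
    (if (l.foldl aStep (acc, w, fb, v)).2.1 ≠ 0
     then (l.foldl aStep (acc, w, fb, v)).1 ++
            [((l.foldl aStep (acc, w, fb, v)).2.2.1, (l.foldl aStep (acc, w, fb, v)).2.1)]
     else (l.foldl aStep (acc, w, fb, v)).1)
    = acc ++ loopA l.length v fb w := by
  induction l with
  | nil =>
    intro acc w fb v hw
    simp only [List.foldl_nil, List.length_nil, loopA]
    have hne : w ≠ 0 := by omega
    rw [if_pos hne]
  | cons x l ih =>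
    intro acc w fb v hw
    simp only [List.foldl_cons, List.length_cons]
    by_cases hb : PySem.Int.mod v 2 = fb
    · rw [show aStep (acc, w, fb, v) x = (acc, w + 1, fb, PySem.Int.floordiv v 2) from by
        simp only [aStep]; rw [if_pos hb]]
      rw [ih acc (w + 1) fb (PySem.Int.floordiv v 2) (by omega)]
      simp only [loopA]
      rw [if_pos hb]
    · rw [show aStep (acc, w, fb, v) x
            = (acc ++ [(fb, w)], 1, PySem.Int.mod v 2, PySem.Int.floordiv v 2) from by
        simp only [aStep]; rw [if_neg hb]]
      rw [ih (acc ++ [(fb, w)]) 1 (PySem.Int.mod v 2) (PySem.Int.floordiv v 2) (by omega)]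
      simp only [loopA]
      rw [if_neg hb]
      simp [List.append_assoc]

-- ===== VERDICT (by name: the statement is the Claim_ definition above) =====
theorem iter_bits_sequences_spec : Claim_equal_iter_bits_sequences := by
  intro val length _ hpre
  have hc0 : 0 < length ∧ 0 ≤ val := hpre
  obtain ⟨n, hn⟩ : ∃ n : Nat, val = (n : Int) := ⟨val.toNat, by omega⟩
  subst hn
  unfold Spec_iter_bits_sequences iter_bits_sequences iter_bits_sequences_alt
  simp only [if_pos hc0]
  rw [foldA_eq _ _ 1 _ _ (le_refl 1)]
  have hlen : (PySem.List.pyRange 0 (length - 1) 1).length = (length - 1).toNat := by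
    rw [PySem.List.length_pyRange_one]; omega
  rw [hlen, modc n, divc n]
  rw [scanA ((length - 1).toNat) (n / 2) (n % 2) 1 (le_refl 1)]
  rw [altLoop_eq length.toNat n 0 length (by omega) (by omega)]
  have h0 : (length - 0).toNat = ((length - 1).toNat) + 1 := by omega
  rw [h0, loopR_succ ((length - 1).toNat) n, runOf_eq_tc ((length - 1).toNat) n]
  have hs : n / 2 / 2 ^ tc (n % 2) ((length - 1).toNat) (n / 2)
      = n / 2 ^ (tc (n % 2) ((length - 1).toNat) (n / 2) + 1) := by
    rw [Nat.div_div_eq_div_mul, pow_succ']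
  rw [hs]
  simp
  omega
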